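-- pv_equiv track=rewrite | github.com/jaywink/pss | psslib/driver.py | _pattern_has_uppercase
-- ===== SOURCE A (Python) =====
-- def _pattern_has_uppercase(pattern):
--     """ Check whether the given regex pattern has uppercase letters to match
--     """
--     # Somewhat rough - check for uppercase chars not following an escape
--     # char (which may mean valid regex flags like \A or \B)
--     skipnext = False
--     for c in pattern:
--         if skipnext:
--             skipnext = False
--             continue
--         elif c == '\\':
--             skipnext = True
--         else:
--             if c >= 'A' and c <= 'Z':
--                 return True
--     return False
-- ===== SOURCE B (Python) =====
-- import re
--
-- def _pattern_has_uppercase(pattern):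
--     """ Check whether the given regex pattern has uppercase letters to match
--     """
--     # Remove every escape sequence (backslash plus the following char);
--     # a trailing lone backslash remains and is harmlessly non-uppercase.
--     cleaned = re.sub(r'\\.', '', pattern, flags=re.DOTALL)
--     return re.search(r'[A-Z]', cleaned) is not None
-- ===== Notes on version B (the rewrite author's own statement) =====
-- stated objective: idiomatic
-- what changed: The hand-rolled stateful skipnext scan with an early return is replaced by a two-pass strip-then-search: remove every escape sequence with re.sub, then search the cleaned pattern for [A-Z].
import Mathlib
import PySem

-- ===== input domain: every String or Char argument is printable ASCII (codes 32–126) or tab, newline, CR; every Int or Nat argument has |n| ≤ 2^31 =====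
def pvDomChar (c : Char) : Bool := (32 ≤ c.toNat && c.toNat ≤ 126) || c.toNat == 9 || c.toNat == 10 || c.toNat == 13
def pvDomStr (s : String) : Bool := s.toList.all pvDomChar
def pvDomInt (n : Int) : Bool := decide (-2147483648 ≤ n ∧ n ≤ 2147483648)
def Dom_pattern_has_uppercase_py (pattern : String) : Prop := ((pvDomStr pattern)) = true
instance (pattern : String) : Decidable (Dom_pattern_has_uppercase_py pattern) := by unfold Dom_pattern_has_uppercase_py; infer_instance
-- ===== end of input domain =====

-- B replaces A's stateful skipnext scan by strip-escapes-then-search; ports agree on every input.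

-- ===== PORT A =====
-- A's loop: skipnext is the Bool state; early 'return True' becomes returning true.
def pvLoopA : Bool → List Char → Bool
  | _, [] => false
  | true, _ :: cs => pvLoopA false cs
  | false, c :: cs =>
    if c = '\\' then pvLoopA true cs
    else if 'A' ≤ c ∧ c ≤ 'Z' then true
    else pvLoopA false cs

def pattern_has_uppercase_py (pattern : String) : Bool :=
  pvLoopA false pattern.toList

-- ===== PORT B =====
-- re.sub(r'\\.', '', pattern, flags=re.DOTALL): drop each backslash plus its
-- following char, left to right; a trailing lone backslash stays.
def pvStripEsc : List Char → List Char
  | [] => []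
  | ['\\'] => ['\\']
  | '\\' :: _ :: cs => pvStripEsc cs
  | c :: cs => c :: pvStripEsc cs

-- re.search(r'[A-Z]', cleaned) is not None
def pattern_has_uppercase_py_alt (pattern : String) : Bool :=
  (pvStripEsc pattern.toList).any (fun c => 'A' ≤ c && c ≤ 'Z')

-- ===== PRECONDITION & SPEC =====
def Spec_pattern_has_uppercase_py (pattern : String) (out : Bool) : Prop := out = pattern_has_uppercase_py_alt pattern
instance (pattern : String) (out : Bool) : Decidable (Spec_pattern_has_uppercase_py pattern out) := by unfold Spec_pattern_has_uppercase_py; infer_instance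

-- ===== CLAIM (what is proved, stated in full; the proofs are below) =====
def Claim_equal_pattern_has_uppercase_py : Prop := ∀ (pattern : String), Dom_pattern_has_uppercase_py pattern → Spec_pattern_has_uppercase_py pattern (pattern_has_uppercase_py pattern)

-- ===== LEMMAS AND PROOFS =====
theorem pvLoopA_eq_strip (l : List Char) :
    pvLoopA false l = (pvStripEsc l).any (fun c => 'A' ≤ c && c ≤ 'Z') := by
  induction l using pvStripEsc.induct with
  | case1 => simp [pvLoopA, pvStripEsc]
  | case2 => simp [pvLoopA, pvStripEsc]
  | case3 c cs ih => simp [pvLoopA, pvStripEsc, ih]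
  | case4 c cs h1 h2 ih =>
    have hc : ¬ c = '\\' := by
      intro h; subst h
      cases cs with
      | nil => exact h1 rfl rfl
      | cons d ds => exact h2 d ds rfl rfl
    simp only [pvLoopA, pvStripEsc, if_neg hc, List.any_cons]
    split_ifs with h
    · simp [h.1, h.2]
    · rcases Decidable.not_and_iff_or_not.mp h with h' | h' <;>
        simp [decide_eq_false h', ih]

-- ===== VERDICT (by name: the statement is the Claim_ definition above) =====
theorem pattern_has_uppercase_py_spec : Claim_equal_pattern_has_uppercase_py := by
  intro pattern _
  unfold Spec_pattern_has_uppercase_py pattern_has_uppercase_py pattern_has_uppercase_py_alt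
  exact pvLoopA_eq_strip _
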